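-- pv_equiv track=rewrite | github.com/warpdotdev/Warp | script/font_fallback/generate-mappings.py | collapse_to_ranges
-- ===== SOURCE A (Python) =====
-- from operator import itemgetter
--
-- def collapse_to_ranges(mapping):
--     mapping_list = [(k, v) for k, v in mapping.items()]
--     mapping_list.sort(key=itemgetter(0))
--
--     ranges = []
--     prev_font = None
--     active_range = None
--
--     for code_point, font in mapping_list:
--         if active_range and prev_font and (active_range[1], prev_font) != (code_point - 1, font):
--             ranges.append((active_range, prev_font))
--             active_range = None
--
--         if not active_range:
--             active_range = (code_point, code_point)
--         else:
--             active_range = (active_range[0], code_point)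
--         prev_font = font
--
--     if active_range and prev_font:
--         ranges.append((active_range, prev_font))
--
--     return ranges
-- ===== SOURCE B (Python) =====
-- from operator import itemgetter
--
--
-- def collapse_to_ranges(mapping):
--     # Two-pointer run splitting over the sorted items: advance k to the end of
--     # the maximal run starting at i, emit its range, continue after the run.
--     # A run extends while no break is due, where a break is due after an item
--     # with a non-empty font whose successor is not the next consecutive code
--     # point with the same font; a run whose last font is empty yields no range.
--     items = sorted(mapping.items(), key=itemgetter(0))
--     n = len(items)
--     ranges = []
--     i = 0
--     while i < n:
--         k = i + 1
--         while k < n and not (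
--             items[k - 1][1]
--             and (items[k][0] != items[k - 1][0] + 1 or items[k][1] != items[k - 1][1])
--         ):
--             k += 1
--         end_cp, end_font = items[k - 1]
--         if end_font:
--             ranges.append(((items[i][0], end_cp), end_font))
--         i = k
--     return ranges
-- ===== Notes on version B (the rewrite author's own statement) =====
-- stated objective: alternative
-- what changed: Replaces A's single stateful fold (active_range/prev_font accumulator mutated per item with a break test) by a lookahead run-splitting recursion: measure the maximal leading run with a while loop, emit its range (none if its last font is empty), recurse on the remainder.
import Mathlib
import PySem

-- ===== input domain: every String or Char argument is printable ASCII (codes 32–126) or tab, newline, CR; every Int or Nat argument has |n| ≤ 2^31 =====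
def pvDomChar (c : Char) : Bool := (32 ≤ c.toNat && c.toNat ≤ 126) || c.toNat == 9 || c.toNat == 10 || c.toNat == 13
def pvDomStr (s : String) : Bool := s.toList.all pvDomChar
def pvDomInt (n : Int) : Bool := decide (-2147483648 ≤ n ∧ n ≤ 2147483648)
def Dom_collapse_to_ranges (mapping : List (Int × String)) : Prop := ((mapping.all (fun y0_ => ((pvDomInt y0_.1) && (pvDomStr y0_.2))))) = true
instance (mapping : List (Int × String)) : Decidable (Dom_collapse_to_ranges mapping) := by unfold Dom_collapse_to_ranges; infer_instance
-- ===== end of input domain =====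

-- B replaces A's stateful fold (active_range/prev_font accumulator with a break test per item)
-- by a lookahead run-splitting recursion: split off the maximal leading run, emit its range,
-- recurse on the rest (objective: alternative decomposition, same cost; A's rule that an
-- empty-string font never closes a range is kept).

-- ===== PORT A =====
def collapse_to_ranges (mapping : List (Int × String)) : List ((Int × Int) × String) :=
  let mapping_list := PySem.List.sorted mapping (fun kv => kv.1) false
  let st := mapping_list.foldl
    (fun (acc : List ((Int × Int) × String) × Option String × Option (Int × Int)) cf =>
      let code_point := cf.1
      let font := cf.2
      -- 'if active_range and prev_font and (active_range[1], prev_font) != (code_point - 1, font)'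
      let br : List ((Int × Int) × String) × Option (Int × Int) :=
        match acc.2.2, acc.2.1 with
        | some ar, some pf =>
          if pf ≠ "" ∧ (ar.2, pf) ≠ (code_point - 1, font)
          then (acc.1 ++ [(ar, pf)], none)
          else (acc.1, some ar)
        | ar, _ => (acc.1, ar)
      -- 'if not active_range: … else: …'
      let active : Int × Int :=
        match br.2 with
        | none => (code_point, code_point)
        | some ar => (ar.1, code_point)
      (br.1, some font, some active))
    ([], none, none)
  -- 'if active_range and prev_font: ranges.append(...)'
  match st with
  | (ranges, some pf, some ar) => if pf ≠ "" then ranges ++ [(ar, pf)] else ranges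
  | (ranges, _, _) => ranges

-- ===== PORT B =====
-- the 'while' loop of Source B's _runs: number of items after the first that continue the run;
-- the previous item (pc, pf) is carried instead of re-indexing items[k-1]
def pvRunLen : List (Int × String) → Int × String → Nat
  | [], _ => 0
  | (cp, g) :: rest, (pc, pf) =>
    if pf ≠ "" ∧ (cp ≠ pc + 1 ∨ g ≠ pf) then 0 else pvRunLen rest (cp, g) + 1

-- Source B's _runs
def pvRuns : List (Int × String) → List ((Int × Int) × String)
  | [] => []
  | (start, f0) :: rest =>
    let n := pvRunLen rest (start, f0)
    let e := PySem.List.pyGetD ((start, f0) :: rest) (n : Int) (0, "")  -- items[k - 1]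
    (if e.2 ≠ "" then [((start, e.1), e.2)] else []) ++ pvRuns (rest.drop n)
termination_by l => l.length
decreasing_by simp

def collapse_to_ranges_alt (mapping : List (Int × String)) : List ((Int × Int) × String) :=
  pvRuns (PySem.List.sorted mapping (fun kv => kv.1) false)

-- ===== PRECONDITION & SPEC =====
def Spec_collapse_to_ranges (mapping : List (Int × String)) (out : List ((Int × Int) × String)) : Prop := out = collapse_to_ranges_alt mapping
instance (mapping : List (Int × String)) (out : List ((Int × Int) × String)) : Decidable (Spec_collapse_to_ranges mapping out) := by unfold Spec_collapse_to_ranges; infer_instance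

-- ===== CLAIM (what is proved, stated in full; the proofs are below) =====
def Claim_equal_collapse_to_ranges : Prop := ∀ (mapping : List (Int × String)), Dom_collapse_to_ranges mapping → Spec_collapse_to_ranges mapping (collapse_to_ranges mapping)

-- ===== LEMMAS AND PROOFS =====

-- A's loop step and finalisation, named for the proofs (definitionally the port's lambdas)
def pvStepA (acc : List ((Int × Int) × String) × Option String × Option (Int × Int))
    (cf : Int × String) : List ((Int × Int) × String) × Option String × Option (Int × Int) :=
  let code_point := cf.1
  let font := cf.2
  let br : List ((Int × Int) × String) × Option (Int × Int) :=
    match acc.2.2, acc.2.1 with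
    | some ar, some pf =>
      if pf ≠ "" ∧ (ar.2, pf) ≠ (code_point - 1, font)
      then (acc.1 ++ [(ar, pf)], none)
      else (acc.1, some ar)
    | ar, _ => (acc.1, ar)
  let active : Int × Int :=
    match br.2 with
    | none => (code_point, code_point)
    | some ar => (ar.1, code_point)
  (br.1, some font, some active)

def pvFinA (st : List ((Int × Int) × String) × Option String × Option (Int × Int)) :
    List ((Int × Int) × String) :=
  match st with
  | (ranges, some pf, some ar) => if pf ≠ "" then ranges ++ [(ar, pf)] else ranges
  | (ranges, _, _) => ranges

-- common recursive description of both programs: mid-run state is the open range (a, e)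
-- whose last font is pf
def pvSpec (a e : Int) (pf : String) : List (Int × String) → List ((Int × Int) × String)
  | [] => if pf ≠ "" then [((a, e), pf)] else []
  | (cp, g) :: rest =>
    if pf ≠ "" ∧ (e, pf) ≠ (cp - 1, g)
    then ((a, e), pf) :: pvSpec cp cp g rest
    else pvSpec a cp g rest

def pvSpecTop : List (Int × String) → List ((Int × Int) × String)
  | [] => []
  | (cp, f) :: rest => pvSpec cp cp f rest

theorem pvA_unfold (mapping : List (Int × String)) :
    collapse_to_ranges mapping =
      pvFinA ((PySem.List.sorted mapping (fun kv => kv.1) false).foldl pvStepA ([], none, none)) := rfl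

theorem pvA_loop (l : List (Int × String)) :
    ∀ (R : List ((Int × Int) × String)) (a e : Int) (pf : String),
      pvFinA (l.foldl pvStepA (R, some pf, some (a, e))) = R ++ pvSpec a e pf l := by
  induction l with
  | nil =>
    intro R a e pf
    by_cases hpf : pf = "" <;> simp [pvFinA, pvSpec, hpf]
  | cons hd tl ih =>
    intro R a e pf
    obtain ⟨cp, g⟩ := hd
    by_cases hc : pf ≠ "" ∧ ((e, pf) : Int × String) ≠ (cp - 1, g)
    · have : pvStepA (R, some pf, some (a, e)) (cp, g)
          = (R ++ [((a, e), pf)], some g, some (cp, cp)) := by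
        simp only [pvStepA]
        rw [if_pos hc]
      have hs : pvSpec a e pf ((cp, g) :: tl) = ((a, e), pf) :: pvSpec cp cp g tl := by
        simp only [pvSpec]; rw [if_pos hc]
      rw [List.foldl_cons, this, ih, hs]
      simp
    · have : pvStepA (R, some pf, some (a, e)) (cp, g)
          = (R, some g, some (a, cp)) := by
        simp only [pvStepA]
        rw [if_neg hc]
      have hs : pvSpec a e pf ((cp, g) :: tl) = pvSpec a cp g tl := by
        simp only [pvSpec]; rw [if_neg hc]
      rw [List.foldl_cons, this, ih, hs]

theorem pvA_top (l : List (Int × String)) :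
    pvFinA (l.foldl pvStepA ([], none, none)) = pvSpecTop l := by
  cases l with
  | nil => rfl
  | cons hd tl =>
    obtain ⟨cp, f⟩ := hd
    have hstep : pvStepA ([], none, none) (cp, f) = ([], some f, some (cp, cp)) := by
      simp [pvStepA]
    rw [List.foldl_cons, hstep, pvA_loop tl [] cp cp f]
    rfl

theorem pvSpec_run (rest : List (Int × String)) : ∀ (a e : Int) (pf : String),
    pvSpec a e pf rest =
      (if (((e, pf) :: rest).getD (pvRunLen rest (e, pf)) (0, "")).2 ≠ "" then
        [((a, (((e, pf) :: rest).getD (pvRunLen rest (e, pf)) (0, "")).1),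
          (((e, pf) :: rest).getD (pvRunLen rest (e, pf)) (0, "")).2)]
       else []) ++ pvSpecTop (rest.drop (pvRunLen rest (e, pf))) := by
  induction rest with
  | nil => intro a e pf; by_cases hpf : pf = "" <;> simp [pvSpec, pvRunLen, pvSpecTop, hpf]
  | cons hd tl ih =>
    intro a e pf
    obtain ⟨cp, g⟩ := hd
    by_cases hc : pf ≠ "" ∧ ((e, pf) : Int × String) ≠ (cp - 1, g)
    · have hrl : pvRunLen ((cp, g) :: tl) (e, pf) = 0 := by
        simp only [pvRunLen]
        rw [if_pos]
        refine ⟨hc.1, ?_⟩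
        by_cases h1 : cp = e + 1
        · right; intro h2; exact hc.2 (by rw [h2]; exact Prod.ext (by omega) rfl)
        · left; omega
      rw [hrl]
      have : pvSpec a e pf ((cp, g) :: tl) = ((a, e), pf) :: pvSpec cp cp g tl := by
        simp only [pvSpec]; rw [if_pos hc]
      rw [this]
      simp only [List.getD_cons_zero, List.drop_zero, pvSpecTop]
      rw [if_pos hc.1]
      rfl
    · have hcc : ¬(pf ≠ "" ∧ (cp ≠ e + 1 ∨ g ≠ pf)) := by
        intro h
        apply hc
        refine ⟨h.1, fun heq => ?_⟩
        rcases h.2 with h2 | h2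
        · exact h2 (by have := congrArg Prod.fst heq; simp at this; omega)
        · exact h2 (by have := congrArg Prod.snd heq; simpa using this.symm)
      have hrl : pvRunLen ((cp, g) :: tl) (e, pf) = pvRunLen tl (cp, g) + 1 := by
        simp only [pvRunLen]
        rw [if_neg hcc]
      rw [hrl]
      have : pvSpec a e pf ((cp, g) :: tl) = pvSpec a cp g tl := by
        simp only [pvSpec]; rw [if_neg hc]
      rw [this, ih a cp g]
      rfl

theorem pvRuns_eq_specTop (l : List (Int × String)) : pvRuns l = pvSpecTop l := by
  induction l using pvRuns.induct with
  | case1 => simp [pvRuns, pvSpecTop]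
  | case2 start f0 rest n ih =>
    rw [pvRuns]
    show (if (PySem.List.pyGetD ((start, f0) :: rest) ((pvRunLen rest (start, f0) : Nat) : Int) (0, "")).2 ≠ "" then
        [((start, (PySem.List.pyGetD ((start, f0) :: rest) ((pvRunLen rest (start, f0) : Nat) : Int) (0, "")).1),
          (PySem.List.pyGetD ((start, f0) :: rest) ((pvRunLen rest (start, f0) : Nat) : Int) (0, "")).2)]
       else []) ++ pvRuns (rest.drop (pvRunLen rest (start, f0))) = _
    rw [PySem.List.pyGetD_natCast, ih]
    show _ = pvSpec start start f0 rest
    rw [pvSpec_run rest start start f0]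

-- ===== VERDICT (by name: the statement is the Claim_ definition above) =====
theorem collapse_to_ranges_spec : Claim_equal_collapse_to_ranges := by
  intro mapping _
  show collapse_to_ranges mapping = collapse_to_ranges_alt mapping
  rw [pvA_unfold, pvA_top]
  show pvSpecTop _ = pvRuns _
  rw [pvRuns_eq_specTop]
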